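-- pv_equiv track=rewrite | github.com/KuboBahyl/coding-interviews | Algo problems/Interviews/RocketPath.py | max_rocket_sum
-- ===== SOURCE A (Python) =====
-- import copy
--
-- def max_rocket_sum(grid):
--     M = len(grid)
--     if M == 0:
--         return
--
--     N = len(grid[0])
--     if N == 0:
--         return
--
--     # M,N > 0
--     cost_grid = copy.deepcopy(grid)
--     for i in range(1, M):
--         for j in range(N):
--             if j == 0:
--                 cost_grid[i][j] += max(cost_grid[i - 1][j], cost_grid[i - 1][j + 1])
--             elif j == N - 1:
--                 cost_grid[i][j] += max(cost_grid[i - 1][j - 1], cost_grid[i - 1][j])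
--             else:
--                 cost_grid[i][j] += max(cost_grid[i - 1][j - 1], cost_grid[i - 1][j], cost_grid[i - 1][j + 1])
--
--     # find max
--     max_cost = 0
--     for j in range(N):
--         if cost_grid[-1][j] > max_cost:
--             max_cost = cost_grid[-1][j]
--             last_j = j
--
--     best_path = [None] * M
--     best_path[-1] = grid[-1][last_j]
--     for i in range(M - 2, -1, -1):
--         max_j = last_j
--         for j in range(N):
--             if last_j - 1 <= j <= last_j + 1:
--                 val = cost_grid[i][j]
--                 if val > cost_grid[i][max_j]:
--                     max_j = j
--
--         best_path[i] = grid[i][max_j]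
--         last_j = max_j
--
--     return max_cost, best_path
-- ===== SOURCE B (Python) =====
-- def max_rocket_sum(grid):
--     if len(grid) == 0:
--         return
--     N = len(grid[0])
--     if N == 0:
--         return
--     # single forward pass: stream the cost rows and record, for every cell of
--     # row i, the predecessor column in row i-1 that maximizes its cost
--     # (tie-break: center, then left, then right — replace only on strict >).
--     prev = list(grid[0][:N])
--     pars = []            # pars[i-1][j] = best predecessor column of cell (i, j)
--     for i in range(1, len(grid)):
--         row = grid[i]
--         cur = []
--         par = []
--         for j in range(N):
--             p = j
--             if j >= 1 and prev[j - 1] > prev[p]: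
--                 p = j - 1
--             if j + 1 < N and prev[j + 1] > prev[p]:
--                 p = j + 1
--             cur.append(row[j] + prev[p])
--             par.append(p)
--         pars.append(par)
--         prev = cur
--     # locate the best end column in the final cost row (first strict maximum > 0)
--     max_cost = 0
--     last_j = None
--     for j in range(N):
--         if prev[j] > max_cost:
--             max_cost = prev[j]
--             last_j = j
--     # rebuild the path by following parent pointers bottom-up, no re-scans
--     path = []
--     col = last_j
--     for i in range(len(grid) - 1, 0, -1):
--         path.append(grid[i][col])
--         col = pars[i - 1][col]
--     path.append(grid[0][col])
--     path.reverse()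
--     return max_cost, path
-- ===== Notes on version B (the rewrite author's own statement) =====
-- stated objective: alternative
-- what changed: B streams the DP forward pass row by row while recording a parent-column table (same center-left-right strict tie-break), then rebuilds the path by following parent pointers bottom-up instead of A's in-place 2D mutation plus a windowed re-scan of the cost grid per row during backtracking.
import Mathlib
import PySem

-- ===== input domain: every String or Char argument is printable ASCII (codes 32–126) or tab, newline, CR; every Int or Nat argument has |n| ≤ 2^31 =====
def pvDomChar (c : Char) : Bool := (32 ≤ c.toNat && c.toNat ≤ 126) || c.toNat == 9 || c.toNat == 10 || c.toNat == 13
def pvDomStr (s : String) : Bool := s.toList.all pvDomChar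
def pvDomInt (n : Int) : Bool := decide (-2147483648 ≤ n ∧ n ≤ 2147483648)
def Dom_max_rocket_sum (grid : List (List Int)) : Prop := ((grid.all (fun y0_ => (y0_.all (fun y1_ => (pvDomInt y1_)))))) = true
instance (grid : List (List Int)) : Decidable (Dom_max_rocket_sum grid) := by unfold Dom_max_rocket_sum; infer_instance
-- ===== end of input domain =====

-- B replaces A's backtracking re-scan of the cost grid by parent pointers recorded
-- during a single streamed forward pass (objective: alternative decomposition; the
-- return value is proved identical on Pre_, which is exactly where A returns).

-- ===== PORT A =====
-- cost_grid[i][j] (reads with Python index semantics; default only hit outside Pre_)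
def pvArow (cg : List (List Int)) (i : Int) : List Int := PySem.List.pyGetD cg i []
def pvAget (cg : List (List Int)) (i j : Int) : Int := PySem.List.pyGetD (pvArow cg i) j 0
-- list assignment cost_grid[i][j] = v; exact for the in-range nonnegative i, j A uses under Pre_
def pvAset (cg : List (List Int)) (i j : Int) (v : Int) : List (List Int) :=
  cg.set i.toNat ((pvArow cg i).set j.toNat v)

def max_rocket_sum (grid : List (List Int)) : Option (Int × List Int) :=
  let M : Int := grid.length
  if M = 0 then none else
  let N : Int := (pvArow grid 0).length
  if N = 0 then none else
  let cost_grid := (PySem.List.pyRange 1 M 1).foldl (fun cg i =>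
    (PySem.List.pyRange 0 N 1).foldl (fun cg j =>
      pvAset cg i j (pvAget cg i j +
        (if j = 0 then max (pvAget cg (i-1) j) (pvAget cg (i-1) (j+1))
         else if j = N - 1 then max (pvAget cg (i-1) (j-1)) (pvAget cg (i-1) j)
         else max (max (pvAget cg (i-1) (j-1)) (pvAget cg (i-1) j)) (pvAget cg (i-1) (j+1))))) cg) grid
  let fm := (PySem.List.pyRange 0 N 1).foldl (fun (s : Int × Option Int) j =>
      if pvAget cost_grid (-1) j > s.1 then (pvAget cost_grid (-1) j, some j) else s) (0, none)
  match fm.2 with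
  | none => none      -- Python raises UnboundLocalError here; outside Pre_
  | some lj0 =>
    let st := (PySem.List.pyRange (M-2) (-1) (-1)).foldl (fun (st : List (Option Int) × Int) i =>
        let mj := (PySem.List.pyRange 0 N 1).foldl (fun mj j =>
            if st.2 - 1 ≤ j ∧ j ≤ st.2 + 1 then
              (if pvAget cost_grid i j > pvAget cost_grid i mj then j else mj)
            else mj) st.2
        (st.1.set i.toNat (some (pvAget grid i mj)), mj))
      ((List.replicate M.toNat none).set (M.toNat - 1) (some (pvAget grid (-1) lj0)), lj0)
    some (fm.1, st.1.map (fun o => o.getD 0))   -- under Pre_ every best_path slot is filled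

-- ===== PORT B =====
def pvBg (xs : List Int) (j : Int) : Int := PySem.List.pyGetD xs j 0
-- Source B's predecessor choice: start at the center, take the left / right neighbour only on strict >
def pvBpar (N : Int) (prev : List Int) (j : Int) : Int :=
  let p1 := if 1 ≤ j ∧ pvBg prev (j-1) > pvBg prev j then j - 1 else j
  if j + 1 < N ∧ pvBg prev (j+1) > pvBg prev p1 then j + 1 else p1

def max_rocket_sum_alt (grid : List (List Int)) : Option (Int × List Int) :=
  if (grid.length : Int) = 0 then none else
  let N : Int := (PySem.List.pyGetD grid 0 []).length
  if N = 0 then none else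
  let fp := (PySem.List.pyRange 1 grid.length 1).foldl (fun (st : List Int × List (List Int)) i =>
      let cp := (PySem.List.pyRange 0 N 1).foldl (fun (cp : List Int × List Int) j =>
          let p := pvBpar N st.1 j
          (cp.1 ++ [pvBg (PySem.List.pyGetD grid i []) j + pvBg st.1 p], cp.2 ++ [p]))
        (([] : List Int), ([] : List Int))
      (cp.1, st.2 ++ [cp.2]))
    (PySem.List.slice (PySem.List.pyGetD grid 0 []) none (some N), ([] : List (List Int)))
  let fm := (PySem.List.pyRange 0 N 1).foldl (fun (s : Int × Option Int) j =>
      if pvBg fp.1 j > s.1 then (pvBg fp.1 j, some j) else s) (0, none)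
  match fm.2 with
  | none => none     -- Source B raises TypeError here; outside Pre_
  | some lj0 =>
    let walk := (PySem.List.pyRange ((grid.length : Int) - 1) 0 (-1)).foldl (fun (st : List Int × Int) i =>
        (st.1 ++ [pvBg (PySem.List.pyGetD grid i []) st.2],
         pvBg (PySem.List.pyGetD fp.2 (i-1) []) st.2)) (([] : List Int), lj0)
    some (fm.1, (walk.1 ++ [pvBg (PySem.List.pyGetD grid 0 []) walk.2]).reverse)

-- ===== PRECONDITION & SPEC =====
-- spec-level helpers (independent of both ports): the streamed DP cost of the last row
def pvBest (prev : List Int) (N j : Nat) : Int :=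
  max (max (prev.getD (j-1) 0) (prev.getD j 0)) (if j+1 < N then prev.getD (j+1) 0 else prev.getD j 0)
def pvCostAux (N : Nat) (prev : List Int) : List (List Int) → List Int
  | [] => prev
  | r :: rs => pvCostAux N ((List.range N).map (fun j => r.getD j 0 + pvBest prev N j)) rs

-- Pre_ is exactly where Python A returns: it excludes only inputs on which A raises —
-- a row shorter than row 0 or a single column with ≥ 2 rows (IndexError), and grids whose
-- best descending-path sum into the last row is ≤ 0 (UnboundLocalError on last_j).
def Pre_max_rocket_sum (grid : List (List Int)) : Prop :=
  grid = [] ∨ (grid.headD []).length = 0 ∨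
    ((∀ r ∈ grid, (grid.headD []).length ≤ r.length) ∧
     (grid.length = 1 ∨ 2 ≤ (grid.headD []).length) ∧
     ∃ x ∈ pvCostAux (grid.headD []).length (grid.headD []) grid.tail, 0 < x)
instance (grid : List (List Int)) : Decidable (Pre_max_rocket_sum grid) := by
  unfold Pre_max_rocket_sum; infer_instance

def pvWitness_max_rocket_sum : List (List Int) := [[1, 2], [3, 4]]

def Spec_max_rocket_sum (grid : List (List Int)) (out : Option (Int × List Int)) : Prop := out = max_rocket_sum_alt grid
instance (grid : List (List Int)) (out : Option (Int × List Int)) : Decidable (Spec_max_rocket_sum grid out) := by unfold Spec_max_rocket_sum; infer_instance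

-- ===== CLAIM (what is proved, stated in full; the proofs are below) =====
def Claim_equal_max_rocket_sum : Prop := ∀ (grid : List (List Int)), Dom_max_rocket_sum grid → Pre_max_rocket_sum grid → Spec_max_rocket_sum grid (max_rocket_sum grid)

-- ===== LEMMAS AND PROOFS =====

-- ---- proof-side reference objects ----

-- cost rows 1..M-1, truncated to the first N columns (what B streams)
def pvRrows (N : Nat) (prev : List Int) : List (List Int) → List (List Int)
  | [] => []
  | r :: rs => ((List.range N).map fun j => r.getD j 0 + pvBest prev N j) ::
      pvRrows N ((List.range N).map fun j => r.getD j 0 + pvBest prev N j) rs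

-- full cost rows 1..M-1 (what A's in-place update leaves: new first N columns, old tail)
def pvFrows (N : Nat) (prev : List Int) : List (List Int) → List (List Int)
  | [] => []
  | r :: rs => (((List.range N).map fun j => r.getD j 0 + pvBest prev N j) ++ r.drop N) ::
      pvFrows N ((List.range N).map fun j => r.getD j 0 + pvBest prev N j) rs

-- parent rows 1..M-1 (what B records)
def pvProws (N : Nat) (prev : List Int) : List (List Int) → List (List Int)
  | [] => []
  | r :: rs => ((List.range N).map fun (j : Nat) => pvBpar (N : Int) prev (j : Int)) ::
      pvProws N ((List.range N).map fun j => r.getD j 0 + pvBest prev N j) rs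

-- column of row (t - d), following parents down from column lj at row t (cr = all cost rows)
def pvCols (N : Int) (cr : List (List Int)) (t : Nat) (lj : Int) : Nat → Int
  | 0 => lj
  | d+1 => pvBpar N (cr.getD (t - (d+1)) []) (pvCols N cr t lj d)

-- ---- basic bridging lemmas ----

theorem pvBg_eq_getD (xs : List Int) (j : Nat) : pvBg xs (j : Int) = xs.getD j 0 := by
  simp [pvBg]

theorem pvBpar_eq (N : Int) (prev : List Int) (j : Int) :
    pvBpar N prev j =
      if j + 1 < N ∧ pvBg prev (j+1) > pvBg prev (if 1 ≤ j ∧ pvBg prev (j-1) > pvBg prev j then j - 1 else j)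
      then j + 1
      else if 1 ≤ j ∧ pvBg prev (j-1) > pvBg prev j then j - 1 else j := rfl

theorem pvBpar_range (N : Int) (prev : List Int) (l : Int) (h0 : 0 ≤ l) (hN : l < N) :
    0 ≤ pvBpar N prev l ∧ pvBpar N prev l < N := by
  rw [pvBpar_eq]
  split_ifs <;> omega

theorem best_eq_parget (prev : List Int) (N : Nat) (j : Nat) (hj : j < N) :
    pvBg prev (pvBpar (N : Int) prev (j : Int)) = pvBest prev N j := by
  have e1 : ((j : Int) + 1) = ((j + 1 : Nat) : Int) := by push_cast; ring
  rcases Nat.eq_zero_or_pos j with hj0 | hj1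
  · subst hj0
    have b0 : pvBg prev 0 = prev.getD 0 0 := by simpa using pvBg_eq_getD prev 0
    have b1 : pvBg prev 1 = prev.getD 1 0 := by simpa using pvBg_eq_getD prev 1
    simp only [pvBpar_eq, pvBest, e1, pvBg_eq_getD]
    simp only [Nat.zero_sub, max_def]
    split_ifs <;> simp_all [b0, b1] <;> omega
  · have e2 : ((j : Int) - 1) = ((j - 1 : Nat) : Int) := by omega
    simp only [pvBpar_eq, pvBest, e1, e2, pvBg_eq_getD]
    simp only [max_def]
    split_ifs <;> (try simp only [e1, e2, pvBg_eq_getD] at *) <;> omega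

theorem branch_eq_best (prev : List Int) (N : Nat) (hN : 2 ≤ N) (j : Nat) (hj : j < N) :
    (if (j : Int) = 0 then max (pvBg prev (j : Int)) (pvBg prev ((j : Int)+1))
     else if (j : Int) = (N : Int) - 1 then max (pvBg prev ((j : Int)-1)) (pvBg prev (j : Int))
     else max (max (pvBg prev ((j : Int)-1)) (pvBg prev (j : Int))) (pvBg prev ((j : Int)+1)))
    = pvBest prev N j := by
  have e1 : ((j : Int) + 1) = ((j + 1 : Nat) : Int) := by push_cast; ring
  by_cases hj0 : j = 0
  · subst hj0
    rw [if_pos (by norm_num)]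
    have b0 : pvBg prev 0 = prev.getD 0 0 := by simpa using pvBg_eq_getD prev 0
    have b1 : pvBg prev 1 = prev.getD 1 0 := by simpa using pvBg_eq_getD prev 1
    simp only [pvBest, e1, pvBg_eq_getD, Nat.zero_sub]
    rw [if_pos (by omega : 0 + 1 < N)]
    simp only [max_def]
    split_ifs <;> simp_all [b0, b1] <;> omega
  · have e2 : ((j : Int) - 1) = ((j - 1 : Nat) : Int) := by omega
    by_cases hjN : j = N - 1
    · rw [if_neg (by omega), if_pos (by omega)]
      simp only [pvBest, e2, pvBg_eq_getD]
      rw [if_neg (by omega : ¬ (j + 1 < N))]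
      all_goals simp only [max_def]
      all_goals split_ifs <;> (try simp only [e2, pvBg_eq_getD] at *) <;> omega
    · rw [if_neg (by omega), if_neg (by omega)]
      simp only [pvBest, e1, e2, pvBg_eq_getD]
      rw [if_pos (by omega : j + 1 < N)]
      all_goals simp only [max_def]
      all_goals split_ifs <;> (try simp only [e1, e2, pvBg_eq_getD] at *) <;> omega

-- a fold whose body never changes the state is the identity
theorem foldl_fixed {α β : Type} (f : α → β → α) (L : List β) (h : ∀ s, ∀ x ∈ L, f s x = s) :
    ∀ s, L.foldl f s = s := by
  induction L with
  | nil => intro s; rfl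
  | cons y ys ih =>
      intro s
      rw [List.foldl_cons, h s y (by simp)]
      exact ih (fun s x hx => h s x (List.mem_cons_of_mem _ hx)) s

-- A's windowed argmax re-scan computes exactly B's parent choice
theorem window_scan (N : Int) (row : List Int) (l : Int) (h0 : 0 ≤ l) (hN : l < N) :
    (PySem.List.pyRange 0 N 1).foldl (fun mj j =>
        if l - 1 ≤ j ∧ j ≤ l + 1 then
          (if pvBg row j > pvBg row mj then j else mj)
        else mj) l = pvBpar N row l := by
  have hs1 : PySem.List.pyRange 0 N 1
      = PySem.List.pyRange 0 (max (l-1) 0) 1 ++ PySem.List.pyRange (max (l-1) 0) N 1 :=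
    PySem.List.pyRange_one_append _ _ _ (by omega) (by omega)
  have hs2 : PySem.List.pyRange (max (l-1) 0) N 1
      = PySem.List.pyRange (max (l-1) 0) (min (l+2) N) 1 ++ PySem.List.pyRange (min (l+2) N) N 1 :=
    PySem.List.pyRange_one_append _ _ _ (by omega) (by omega)
  rw [hs1, hs2, List.foldl_append, List.foldl_append]
  rw [foldl_fixed _ _ (by
    intro s x hx
    rw [PySem.List.mem_pyRange_one] at hx
    rw [if_neg (by omega)]) l]
  rw [foldl_fixed _ (PySem.List.pyRange (min (l+2) N) N 1) (by
    intro s x hx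
    rw [PySem.List.mem_pyRange_one] at hx
    rw [if_neg (by omega)])]
  by_cases h1 : 1 ≤ l
  · have ha : max (l-1) 0 = l - 1 := by omega
    by_cases h2 : l + 2 ≤ N
    · have hb : min (l+2) N = l + 2 := by omega
      have hlist : PySem.List.pyRange (l-1) (l+2) 1 = [l-1, l, l+1] := by
        rw [PySem.List.pyRange_one_cons (by omega)]
        have e1 : l - 1 + 1 = l := by ring
        rw [e1, PySem.List.pyRange_one_cons (by omega)]
        rw [PySem.List.pyRange_one_cons (by omega)]
        rw [PySem.List.pyRange_one_eq_nil (by omega)]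
      rw [ha, hb, hlist]
      simp only [List.foldl_cons, List.foldl_nil]
      rw [pvBpar_eq]
      split_ifs <;> omega
    · have hb : min (l+2) N = N := by omega
      have hNl : N = l + 1 := by omega
      have hlist : PySem.List.pyRange (l-1) N 1 = [l-1, l] := by
        rw [hNl, PySem.List.pyRange_one_cons (by omega)]
        have e1 : l - 1 + 1 = l := by ring
        rw [e1, PySem.List.pyRange_one_cons (by omega)]
        rw [PySem.List.pyRange_one_eq_nil (by omega)]
      rw [ha, hb, hlist]
      simp only [List.foldl_cons, List.foldl_nil]
      rw [pvBpar_eq]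
      split_ifs <;> omega
  · have hl0 : l = 0 := by omega
    subst hl0
    have ha : max ((0:Int)-1) 0 = 0 := by omega
    by_cases h2 : (0:Int) + 2 ≤ N
    · have hb : min ((0:Int)+2) N = 2 := by omega
      have hlist : PySem.List.pyRange 0 2 1 = [0, 1] := by
        rw [PySem.List.pyRange_one_cons (by omega)]
        have e1 : (0:Int) + 1 = 1 := by norm_num
        rw [e1, PySem.List.pyRange_one_cons (by omega), PySem.List.pyRange_one_eq_nil (by omega)]
      rw [ha, hb, hlist]
      simp only [List.foldl_cons, List.foldl_nil]
      rw [pvBpar_eq]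
      have e1 : (0:Int) + 1 = 1 := by norm_num
      rw [e1]
      split_ifs <;> omega
    · have hN1 : N = 1 := by omega
      have hb : min ((0:Int)+2) N = 1 := by omega
      have hlist : PySem.List.pyRange 0 1 1 = [0] := by
        rw [PySem.List.pyRange_one_cons (by omega)]
        rw [PySem.List.pyRange_one_eq_nil (by omega)]
      rw [ha, hb, hlist]
      simp only [List.foldl_cons, List.foldl_nil]
      rw [pvBpar_eq]
      split_ifs <;> omega

-- ---- forward pass: A's in-place fold leaves pvFrows ----

theorem pvAget_eq (cg2 : List (List Int)) (a b : Int) : pvAget cg2 a b = pvBg (pvArow cg2 a) b := rfl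

theorem inner_loop (N : Nat) (hN : 2 ≤ N) (cg : List (List Int)) (i : Nat) (hi : 1 ≤ i)
    (hlt : i < cg.length) (hrow : N ≤ (cg.getD i []).length) (hprev : N ≤ (cg.getD (i-1) []).length) :
    (PySem.List.pyRange 0 (N : Int) 1).foldl (fun cg2 j =>
        pvAset cg2 (i : Int) j (pvAget cg2 (i : Int) j +
          (if j = 0 then max (pvAget cg2 ((i : Int)-1) j) (pvAget cg2 ((i : Int)-1) (j+1))
           else if j = (N : Int) - 1 then max (pvAget cg2 ((i : Int)-1) (j-1)) (pvAget cg2 ((i : Int)-1) j)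
           else max (max (pvAget cg2 ((i : Int)-1) (j-1)) (pvAget cg2 ((i : Int)-1) j)) (pvAget cg2 ((i : Int)-1) (j+1))))) cg
    = cg.set i (((List.range N).map fun j => (cg.getD i []).getD j 0 + pvBest (cg.getD (i-1) []) N j)
        ++ (cg.getD i []).drop N) := by
  have e2 : (i : Int) - 1 = ((i - 1 : Nat) : Int) := by omega
  rw [PySem.List.pyRange_zero_natCast, List.foldl_map]
  have aux : ∀ n, n ≤ N →
      (List.range n).foldl (fun cg2 (j : Nat) =>
        pvAset cg2 (i : Int) (j : Int) (pvAget cg2 (i : Int) (j : Int) +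
          (if (j : Int) = 0 then max (pvAget cg2 ((i : Int)-1) (j : Int)) (pvAget cg2 ((i : Int)-1) ((j : Int)+1))
           else if (j : Int) = (N : Int) - 1 then max (pvAget cg2 ((i : Int)-1) ((j : Int)-1)) (pvAget cg2 ((i : Int)-1) (j : Int))
           else max (max (pvAget cg2 ((i : Int)-1) ((j : Int)-1)) (pvAget cg2 ((i : Int)-1) (j : Int))) (pvAget cg2 ((i : Int)-1) ((j : Int)+1))))) cg
      = cg.set i (((List.range n).map fun j => (cg.getD i []).getD j 0 + pvBest (cg.getD (i-1) []) N j)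
          ++ (cg.getD i []).drop n) := by
    intro n
    induction n with
    | zero =>
        intro _
        simp only [List.range_zero, List.map_nil, List.foldl_nil, List.nil_append, List.drop_zero]
        rw [List.getD_eq_getElem _ _ hlt, List.set_getElem_self]
    | succ n ih =>
        intro hn1
        rw [List.range_succ, List.foldl_append, ih (by omega), List.foldl_cons, List.foldl_nil]
        have hCrow : pvArow (cg.set i (((List.range n).map fun j => (cg.getD i []).getD j 0 + pvBest (cg.getD (i-1) []) N j)
            ++ (cg.getD i []).drop n)) (i : Int)
            = ((List.range n).map fun j => (cg.getD i []).getD j 0 + pvBest (cg.getD (i-1) []) N j)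
              ++ (cg.getD i []).drop n := by
          simp only [pvArow, PySem.List.pyGetD_natCast, List.getD_eq_getElem?_getD]
          rw [List.getElem?_set_self (by simpa using hlt)]
          rfl
        have hCprev : pvArow (cg.set i (((List.range n).map fun j => (cg.getD i []).getD j 0 + pvBest (cg.getD (i-1) []) N j)
            ++ (cg.getD i []).drop n)) ((i : Int) - 1) = cg.getD (i-1) [] := by
          rw [e2]
          simp only [pvArow, PySem.List.pyGetD_natCast, List.getD_eq_getElem?_getD]
          rw [List.getElem?_set_ne (show i ≠ i - 1 by omega)]
        simp only [pvAget_eq, hCrow, hCprev]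
        rw [branch_eq_best (cg.getD (i-1) []) N hN n (by omega)]
        have hlenpref : ((List.range n).map fun j => (cg.getD i []).getD j 0 + pvBest (cg.getD (i-1) []) N j).length = n := by
          simp
        have hdropc : (cg.getD i []).drop n = (cg.getD i [])[n] :: (cg.getD i []).drop (n+1) :=
          List.drop_eq_getElem_cons (by omega)
        have hval : pvBg (((List.range n).map fun j => (cg.getD i []).getD j 0 + pvBest (cg.getD (i-1) []) N j)
            ++ (cg.getD i []).drop n) (n : Int) = (cg.getD i []).getD n 0 := by
          rw [pvBg_eq_getD, List.getD_append_right _ _ _ _ (by omega), hlenpref, Nat.sub_self,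
            List.getD_eq_getElem?_getD, List.getElem?_drop, Nat.add_zero, ← List.getD_eq_getElem?_getD]
        rw [hval]
        simp only [pvAset, Int.toNat_natCast]
        rw [hCrow, List.set_set]
        congr 1
        rw [List.set_append_right _ _ (by omega), hlenpref, Nat.sub_self]
        conv_lhs => rw [hdropc]
        rw [List.set_cons_zero, List.map_append, List.append_assoc]
        rfl
  exact aux N (le_refl N)

theorem pvBest_congr (p1 p2 : List Int) (N : Nat) (j : Nat) (hj : j < N)
    (h : ∀ k, k < N → p1.getD k 0 = p2.getD k 0) :
    pvBest p1 N j = pvBest p2 N j := by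
  unfold pvBest
  rw [h j hj, h (j-1) (by omega)]
  by_cases h2 : j + 1 < N
  · rw [if_pos h2, if_pos h2, h (j+1) h2]
  · rw [if_neg h2, if_neg h2]

theorem pvFrows_congr (N : Nat) (p1 p2 : List Int) (rs : List (List Int))
    (h : ∀ k, k < N → p1.getD k 0 = p2.getD k 0) :
    pvFrows N p1 rs = pvFrows N p2 rs := by
  induction rs generalizing p1 p2 with
  | nil => rfl
  | cons r rs ih =>
      show (((List.range N).map fun j => r.getD j 0 + pvBest p1 N j) ++ r.drop N)
          :: pvFrows N ((List.range N).map fun j => r.getD j 0 + pvBest p1 N j) rs = _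
      have hmap : ((List.range N).map fun j => r.getD j 0 + pvBest p1 N j)
          = ((List.range N).map fun j => r.getD j 0 + pvBest p2 N j) := by
        apply List.map_congr_left
        intro k hk
        rw [List.mem_range] at hk
        rw [pvBest_congr p1 p2 N k hk h]
      rw [hmap]
      rfl

theorem outer_loop (N : Nat) (hN : 2 ≤ N) :
    ∀ (rs : List (List Int)) (done : List (List Int)) (hd : done ≠ []),
    N ≤ (done.getLast hd).length → (∀ r ∈ rs, N ≤ r.length) →
    (PySem.List.pyRange (done.length : Int) ((done.length : Int) + (rs.length : Int)) 1).foldl (fun cg i =>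
      (PySem.List.pyRange 0 (N : Int) 1).foldl (fun cg2 j =>
        pvAset cg2 i j (pvAget cg2 i j +
          (if j = 0 then max (pvAget cg2 (i-1) j) (pvAget cg2 (i-1) (j+1))
           else if j = (N : Int) - 1 then max (pvAget cg2 (i-1) (j-1)) (pvAget cg2 (i-1) j)
           else max (max (pvAget cg2 (i-1) (j-1)) (pvAget cg2 (i-1) j)) (pvAget cg2 (i-1) (j+1))))) cg)
      (done ++ rs)
    = done ++ pvFrows N (done.getLast hd) rs := by
  intro rs
  induction rs with
  | nil =>
      intro done hd _ _
      rw [PySem.List.pyRange_one_eq_nil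
        (show (done.length : Int) + (([] : List (List Int)).length : Int) ≤ (done.length : Int) by simp)]
      simp [pvFrows]
  | cons r rs ih =>
      intro done hd hdl hrs
      have hm1 : 1 ≤ done.length := by
        cases done
        · exact absurd rfl hd
        · simp
      rw [PySem.List.pyRange_one_cons
        (show (done.length : Int) < (done.length : Int) + (((r :: rs).length : Int)) by
          have : (0 : Int) < ((r :: rs).length : Int) := by simp
          omega), List.foldl_cons]
      have hgr : (done ++ r :: rs).getD done.length [] = r := by
        rw [List.getD_append_right _ _ _ _ (le_refl _), Nat.sub_self]
        rfl
      have hgp : (done ++ r :: rs).getD (done.length - 1) [] = done.getLast hd := by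
        rw [List.getD_append _ _ _ _ (by omega), List.getLast_eq_getElem hd,
          List.getD_eq_getElem _ _ (by omega)]
      have hstep := inner_loop N hN (done ++ r :: rs) done.length hm1
        (by simp) (by rw [hgr]; exact hrs r (by simp)) (by rw [hgp]; exact hdl)
      rw [hstep, hgr, hgp]
      rw [List.set_append_right _ _ (le_refl _), Nat.sub_self, List.set_cons_zero]
      have hdone' : done ++ (((List.range N).map fun j => r.getD j 0 + pvBest (done.getLast hd) N j) ++ r.drop N) :: rs
          = (done ++ [((List.range N).map fun j => r.getD j 0 + pvBest (done.getLast hd) N j) ++ r.drop N]) ++ rs := by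
        simp
      rw [hdone']
      have hlen' : ((done ++ [((List.range N).map fun j => r.getD j 0 + pvBest (done.getLast hd) N j) ++ r.drop N]).length : Int)
          = (done.length : Int) + 1 := by
        simp
      have hbound : (done.length : Int) + ((r :: rs).length : Int)
          = ((done ++ [((List.range N).map fun j => r.getD j 0 + pvBest (done.getLast hd) N j) ++ r.drop N]).length : Int) + (rs.length : Int) := by
        rw [hlen']
        simp
        push_cast
        ring
      rw [show (done.length : Int) + 1 = ((done ++ [((List.range N).map fun j => r.getD j 0 + pvBest (done.getLast hd) N j) ++ r.drop N]).length : Int) from hlen'.symm, hbound]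
      rw [ih _ (by simp) (by
          rw [List.getLast_concat]
          simp)
        (fun x hx => hrs x (by simp [hx]))]
      rw [List.getLast_concat]
      rw [List.append_assoc, List.singleton_append]
      congr 1
      show _ = pvFrows N (done.getLast hd) (r :: rs)
      rw [show pvFrows N (done.getLast hd) (r :: rs)
          = (((List.range N).map fun j => r.getD j 0 + pvBest (done.getLast hd) N j) ++ r.drop N)
            :: pvFrows N ((List.range N).map fun j => r.getD j 0 + pvBest (done.getLast hd) N j) rs from rfl]
      congr 1
      apply pvFrows_congr
      intro k hk
      rw [List.getD_append _ _ _ _ (by simp [hk])]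

-- ---- forward pass: B's streamed fold ----

theorem b_inner (N : Nat) (prev row : List Int) :
    (PySem.List.pyRange 0 (N : Int) 1).foldl (fun (cp : List Int × List Int) j =>
        let p := pvBpar (N : Int) prev j
        (cp.1 ++ [pvBg row j + pvBg prev p], cp.2 ++ [p])) (([] : List Int), ([] : List Int))
    = ((List.range N).map (fun j => row.getD j 0 + pvBest prev N j),
       (List.range N).map (fun (j : Nat) => pvBpar (N : Int) prev (j : Int))) := by
  show (PySem.List.pyRange 0 (N : Int) 1).foldl (fun (cp : List Int × List Int) j =>
        ((fun (acc : List Int) j => acc ++ [pvBg row j + pvBg prev (pvBpar (N : Int) prev j)]) cp.1 j,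
         (fun (acc : List Int) j => acc ++ [pvBpar (N : Int) prev j]) cp.2 j)) ([], []) = _
  rw [PySem.List.foldl_prod_mk
    (f := fun acc j => acc ++ [pvBg row j + pvBg prev (pvBpar (N : Int) prev j)])
    (g := fun acc j => acc ++ [pvBpar (N : Int) prev j])]
  rw [PySem.List.foldl_append_singleton_eq_map, PySem.List.foldl_append_singleton_eq_map]
  rw [PySem.List.pyRange_zero_natCast, List.map_map, List.map_map, List.nil_append, List.nil_append]
  rw [Prod.mk.injEq]
  constructor
  · apply List.map_congr_left
    intro k hk
    rw [List.mem_range] at hk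
    simp only [Function.comp_apply]
    rw [best_eq_parget prev N k hk, pvBg_eq_getD]
  · rfl

theorem b_body_eq (grid : List (List Int)) (N : Nat) :
    (fun (st : List Int × List (List Int)) (i : Int) =>
      let cp := (PySem.List.pyRange 0 (N : Int) 1).foldl (fun (cp : List Int × List Int) j =>
          let p := pvBpar (N : Int) st.1 j
          (cp.1 ++ [pvBg (PySem.List.pyGetD grid i []) j + pvBg st.1 p], cp.2 ++ [p]))
        (([] : List Int), ([] : List Int))
      (cp.1, st.2 ++ [cp.2]))
    = fun (st : List Int × List (List Int)) (i : Int) =>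
        ((List.range N).map (fun j => (PySem.List.pyGetD grid i []).getD j 0 + pvBest st.1 N j),
         st.2 ++ [(List.range N).map (fun (j : Nat) => pvBpar (N : Int) st.1 (j : Int))]) := by
  funext st i
  show (((PySem.List.pyRange 0 (N : Int) 1).foldl (fun (cp : List Int × List Int) j =>
          let p := pvBpar (N : Int) st.1 j
          (cp.1 ++ [pvBg (PySem.List.pyGetD grid i []) j + pvBg st.1 p], cp.2 ++ [p]))
        (([] : List Int), ([] : List Int))).1,
       st.2 ++ [((PySem.List.pyRange 0 (N : Int) 1).foldl (fun (cp : List Int × List Int) j =>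
          let p := pvBpar (N : Int) st.1 j
          (cp.1 ++ [pvBg (PySem.List.pyGetD grid i []) j + pvBg st.1 p], cp.2 ++ [p]))
        (([] : List Int), ([] : List Int))).2]) = _
  rw [b_inner]

theorem b_forward_aux (grid : List (List Int)) (N : Nat) :
    ∀ (rs : List (List Int)) (m : Nat), grid.length = m + rs.length → grid.drop m = rs →
    ∀ (prev : List Int) (acc : List (List Int)),
      (PySem.List.pyRange (m : Int) (grid.length : Int) 1).foldl
        (fun (st : List Int × List (List Int)) (i : Int) =>
          ((List.range N).map (fun j => (PySem.List.pyGetD grid i []).getD j 0 + pvBest st.1 N j),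
           st.2 ++ [(List.range N).map (fun (j : Nat) => pvBpar (N : Int) st.1 (j : Int))])) (prev, acc)
      = ((prev :: pvRrows N prev rs).getLast (by simp), acc ++ pvProws N prev rs) := by
  intro rs
  induction rs with
  | nil =>
      intro m hlen _ prev acc
      have hm : grid.length = m := by simpa using hlen
      rw [PySem.List.pyRange_one_eq_nil (show (grid.length : Int) ≤ (m : Int) by omega)]
      simp [pvRrows, pvProws]
  | cons r rs ih =>
      intro m hlen hdrop prev acc
      have hm : m < grid.length := by
        rw [hlen, List.length_cons]
        omega
      have hsome : grid[m]? = some r := by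
        have h2 : (List.drop m grid)[0]? = some r := by rw [hdrop]; rfl
        rw [List.getElem?_drop] at h2
        simpa using h2
      have hrow : PySem.List.pyGetD grid (m : Int) [] = r := by
        rw [PySem.List.pyGetD_natCast]
        simp [List.getD, hsome]
      rw [PySem.List.pyRange_one_cons (show (m : Int) < (grid.length : Int) by omega), List.foldl_cons]
      have e1 : ((m : Int) + 1) = ((m + 1 : Nat) : Int) := by push_cast; ring
      have hd2 : List.drop (m+1) grid = rs := by
        have h3 : List.drop 1 (List.drop m grid) = rs := by rw [hdrop]; rfl
        rw [List.drop_drop] at h3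
        simpa [Nat.add_comm] using h3
      show (PySem.List.pyRange ((m : Int) + 1) (grid.length : Int) 1).foldl _
        ((List.range N).map (fun j => (PySem.List.pyGetD grid (m : Int) []).getD j 0 + pvBest prev N j),
         acc ++ [(List.range N).map (fun (j : Nat) => pvBpar (N : Int) prev (j : Int))]) = _
      rw [hrow, e1, ih (m+1) (by rw [hlen, List.length_cons]; omega) hd2 _ _]
      rw [Prod.mk.injEq]
      constructor
      · conv_rhs => rw [show pvRrows N prev (r :: rs)
            = ((List.range N).map fun j => r.getD j 0 + pvBest prev N j)
              :: pvRrows N ((List.range N).map fun j => r.getD j 0 + pvBest prev N j) rs by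
              simp [pvRrows]]
        rw [List.getLast_cons_cons]
      · rw [List.append_assoc, show pvProws N prev (r :: rs)
            = ((List.range N).map fun (j : Nat) => pvBpar (N : Int) prev (j : Int))
              :: pvProws N ((List.range N).map fun j => r.getD j 0 + pvBest prev N j) rs by
              simp [pvProws]]
        rfl

theorem b_forward (grid : List (List Int)) (g0 : List Int) (rest : List (List Int))
    (hg : grid = g0 :: rest) (N : Nat) (hN : N = g0.length) :
    (PySem.List.pyRange 1 (grid.length : Int) 1).foldl (fun (st : List Int × List (List Int)) i =>
      let cp := (PySem.List.pyRange 0 (N : Int) 1).foldl (fun (cp : List Int × List Int) j =>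
          let p := pvBpar (N : Int) st.1 j
          (cp.1 ++ [pvBg (PySem.List.pyGetD grid i []) j + pvBg st.1 p], cp.2 ++ [p]))
        (([] : List Int), ([] : List Int))
      (cp.1, st.2 ++ [cp.2])) (g0, ([] : List (List Int)))
    = ((g0 :: pvRrows N g0 rest).getLast (by simp), pvProws N g0 rest) := by
  rw [b_body_eq grid N]
  have h1 : (1 : Int) = ((1 : Nat) : Int) := by norm_num
  have := b_forward_aux grid N rest 1 (by rw [hg, List.length_cons]; omega) (by rw [hg]; rfl) g0 []
  rw [← h1] at this
  rw [this, List.nil_append]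

-- ---- relating full and truncated cost rows ----

theorem frows_rrows (N : Nat) (prev : List Int) (rs : List (List Int)) (k : Nat) (hk : k < rs.length)
    (j : Int) (h0 : 0 ≤ j) (hj : j < (N : Int)) :
    pvBg ((pvFrows N prev rs).getD k []) j = pvBg ((pvRrows N prev rs).getD k []) j := by
  induction rs generalizing prev k with
  | nil => simp at hk
  | cons r rs ih =>
      cases k with
      | zero =>
          obtain ⟨m, rfl⟩ : ∃ m : Nat, j = (m : Int) := ⟨j.toNat, by omega⟩
          have hm : m < N := by omega
          simp only [pvFrows, pvRrows, List.getD_cons_zero, pvBg_eq_getD]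
          rw [List.getD_append _ _ _ _ (by simpa using hm)]
      | succ k =>
          simp only [pvFrows, pvRrows, List.getD_cons_succ]
          exact ih _ _ (by simpa using hk)

theorem prows_getD (N : Nat) (prev : List Int) (rs : List (List Int)) (k : Nat) (hk : k < rs.length) :
    (pvProws N prev rs).getD k [] = (List.range N).map fun (j : Nat) => pvBpar (N : Int) ((prev :: pvRrows N prev rs).getD k []) (j : Int) := by
  induction rs generalizing prev k with
  | nil => simp at hk
  | cons r rs ih =>
      cases k with
      | zero => simp [pvProws]
      | succ k =>
          simp only [pvProws, pvRrows, List.getD_cons_succ]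
          exact ih _ _ (by simpa using hk)

theorem frows_length (N : Nat) (prev : List Int) (rs : List (List Int)) :
    (pvFrows N prev rs).length = rs.length := by
  induction rs generalizing prev with
  | nil => rfl
  | cons r rs ih => simp [pvFrows, ih]

theorem rrows_length (N : Nat) (prev : List Int) (rs : List (List Int)) :
    (pvRrows N prev rs).length = rs.length := by
  induction rs generalizing prev with
  | nil => rfl
  | cons r rs ih => simp [pvRrows, ih]

-- ---- the shared last-row scan ----

theorem scan_congr (N : Int) (c d : Int → Int) (h : ∀ j, 0 ≤ j → j < N → c j = d j) :
    (PySem.List.pyRange 0 N 1).foldl (fun (s : Int × Option Int) j => if c j > s.1 then (c j, some j) else s) (0, none)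
    = (PySem.List.pyRange 0 N 1).foldl (fun (s : Int × Option Int) j => if d j > s.1 then (d j, some j) else s) (0, none) := by
  apply PySem.List.foldl_congr_mem
  intro acc x hx
  rw [PySem.List.mem_pyRange_one] at hx
  rw [h x hx.1 hx.2]

theorem scan_mem (c : Int → Int) (L : List Int) :
    ∀ (s : Int × Option Int) (l : Int),
      ((L.foldl (fun (s : Int × Option Int) j => if c j > s.1 then (c j, some j) else s) s).2 = some l) →
      s.2 = some l ∨ l ∈ L := by
  induction L with
  | nil => intro s l h; exact Or.inl h
  | cons x xs ih =>
      intro s l h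
      rw [List.foldl_cons] at h
      rcases ih _ l h with h' | h'
      · by_cases hc : c x > s.1
        · rw [if_pos hc] at h'
          simp at h'
          subst h'
          exact Or.inr (by simp)
        · rw [if_neg hc] at h'
          exact Or.inl h'
      · exact Or.inr (List.mem_cons_of_mem _ h')

theorem scan_some_range (N : Int) (c : Int → Int) (l : Int)
    (h : ((PySem.List.pyRange 0 N 1).foldl (fun (s : Int × Option Int) j => if c j > s.1 then (c j, some j) else s) (0, none)).2 = some l) :
    0 ≤ l ∧ l < N := by
  rcases scan_mem c _ _ _ h with h' | h'
  · simp at h'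
  · rw [PySem.List.mem_pyRange_one] at h'
    exact h' 

-- ---- column chain shift ----

theorem pvCols_shift (N : Int) (cr : List (List Int)) (t : Nat) (l : Int) (d : Nat) :
    pvCols N cr (t+1) l (d+1) = pvCols N cr t (pvBpar N (cr.getD t []) l) d := by
  induction d with
  | zero => simp [pvCols]
  | succ d ih =>
      show pvBpar N (cr.getD (t + 1 - (d + 2)) []) (pvCols N cr (t+1) l (d+1)) = _
      rw [ih]
      have : t + 1 - (d + 2) = t - (d + 1) := by omega
      rw [this]
      rfl

theorem pvBpar_congr (N : Int) (r1 r2 : List Int) (l : Int) (h0 : 0 ≤ l) (hN : l < N)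
    (h : ∀ j, 0 ≤ j → j < N → pvBg r1 j = pvBg r2 j) :
    pvBpar N r1 l = pvBpar N r2 l := by
  have hb := h l h0 hN
  rw [pvBpar_eq, pvBpar_eq]
  have hinner : (if 1 ≤ l ∧ pvBg r1 (l-1) > pvBg r1 l then l - 1 else l)
              = (if 1 ≤ l ∧ pvBg r2 (l-1) > pvBg r2 l then l - 1 else l) := by
    by_cases h1 : 1 ≤ l
    · rw [h (l-1) (by omega) (by omega), hb]
    · rw [if_neg (fun hc => h1 hc.1), if_neg (fun hc => h1 hc.1)]
  rw [hinner]
  by_cases h2 : l + 1 < N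
  · rw [h (l+1) (by omega) (by omega)]
    by_cases hC : 1 ≤ l ∧ pvBg r2 (l-1) > pvBg r2 l
    · have h1 : 1 ≤ l := hC.1
      rw [if_pos hC, h (l-1) (by omega) (by omega)]
    · rw [if_neg hC, hb]
  · simp [h2]

theorem a_backtrack (N : Int) (cr : List (List Int)) (W V : Int → Int → Int) (T : Nat)
    (hW : ∀ (i : Int) (l : Int), 0 ≤ i → i < (T : Int) → 0 ≤ l → l < N →
      W i l = pvBpar N (cr.getD i.toNat []) l) :
    ∀ (t : Nat), t ≤ T → ∀ (best : List (Option Int)) (l : Int), t ≤ best.length → 0 ≤ l → l < N →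
      ((PySem.List.pyRange ((t : Int) - 1) (-1) (-1)).foldl
        (fun (st : List (Option Int) × Int) i =>
          (st.1.set i.toNat (some (V i (W i st.2))), W i st.2)) (best, l)).2
        = pvCols N cr t l t ∧
      ∀ (k : Nat),
        (((PySem.List.pyRange ((t : Int) - 1) (-1) (-1)).foldl
          (fun (st : List (Option Int) × Int) i =>
            (st.1.set i.toNat (some (V i (W i st.2))), W i st.2)) (best, l)).1)[k]?
        = if k < t then some (some (V (k : Int) (pvCols N cr t l (t - k)))) else best[k]? := by
  intro t
  induction t with
  | zero =>
      intro ht best l hbl h0 hN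
      rw [PySem.List.pyRange_neg_one_eq_nil (by omega)]
      simp [pvCols]
  | succ t ih =>
      intro ht best l hbl h0 hN
      have e : ((t + 1 : Nat) : Int) - 1 = (t : Int) := by push_cast; ring
      rw [e, PySem.List.pyRange_neg_one_cons (by omega), List.foldl_cons]
      have hWt : W (t : Int) l = pvBpar N (cr.getD t []) l := by
        rw [hW (t : Int) l (by omega) (by omega) h0 hN]
        simp
      rw [hWt]
      have hl' := pvBpar_range N (cr.getD t []) l h0 hN
      have eT : ((t : Int)).toNat = t := by omega
      rw [eT]
      obtain ⟨ih1, ih2⟩ := ih (by omega) (best.set t (some (V (t : Int) (pvBpar N (cr.getD t []) l))))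
        (pvBpar N (cr.getD t []) l) (by simpa using by omega) hl'.1 hl'.2
      constructor
      · rw [ih1]
        exact (pvCols_shift N cr t l t).symm
      · intro k
        rw [ih2 k]
        by_cases hk : k < t
        · rw [if_pos hk, if_pos (by omega)]
          have : t + 1 - k = (t - k) + 1 := by omega
          rw [this, pvCols_shift]
        · by_cases hkt : k = t
          · rw [if_neg hk, if_pos (by omega), hkt]
            rw [List.getElem?_set_self (by omega)]
            have e2 : t + 1 - t = 1 := by omega
            rw [e2]
            show _ = some (some (V (t:Int) (pvBpar N (cr.getD ((t+1) - (0+1)) []) (pvCols N cr (t+1) l 0))))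
            simp [pvCols]
          · rw [if_neg hk, if_neg (by omega)]
            rw [List.getElem?_set_ne (by omega)]

-- ---- B's parent walk ----

theorem b_walk (N : Int) (cr : List (List Int)) (P V : Int → Int → Int) (T : Nat)
    (hP : ∀ (i : Int) (l : Int), 1 ≤ i → i ≤ (T : Int) → 0 ≤ l → l < N →
      P i l = pvBpar N (cr.getD (i.toNat - 1) []) l) :
    ∀ (t : Nat), t ≤ T → ∀ (acc : List Int) (l : Int), 0 ≤ l → l < N →
      (PySem.List.pyRange (t : Int) 0 (-1)).foldl
        (fun (st : List Int × Int) i => (st.1 ++ [V i st.2], P i st.2)) (acc, l)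
      = (acc ++ (List.range t).map (fun (d : Nat) => V ((t : Int) - (d : Int)) (pvCols N cr t l d)),
         pvCols N cr t l t) := by
  intro t
  induction t with
  | zero =>
      intro ht acc l h0 hN
      rw [PySem.List.pyRange_neg_one_eq_nil (by omega)]
      simp [pvCols]
  | succ t ih =>
      intro ht acc l h0 hN
      rw [PySem.List.pyRange_neg_one_cons (by omega), List.foldl_cons]
      have hPt : P ((t + 1 : Nat) : Int) l = pvBpar N (cr.getD t []) l := by
        rw [hP _ l (by omega) (by omega) h0 hN]
        have : (((t + 1 : Nat) : Int)).toNat - 1 = t := by omega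
        rw [this]
      have e : ((t + 1 : Nat) : Int) - 1 = (t : Int) := by push_cast; ring
      rw [hPt, e]
      have hl' := pvBpar_range N (cr.getD t []) l h0 hN
      rw [ih (by omega) (acc ++ [V ((t + 1 : Nat) : Int) l]) (pvBpar N (cr.getD t []) l) hl'.1 hl'.2]
      rw [Prod.mk.injEq]
      refine ⟨?_, ?_⟩
      · rw [List.append_assoc]
        congr 1
        rw [List.range_succ_eq_map, List.map_cons, List.map_map, List.singleton_append,
          List.cons_eq_cons]
        refine ⟨by simp [pvCols], ?_⟩
        apply List.map_congr_left
        intro d hd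
        simp only [Function.comp_apply]
        have e1 : ((t + 1 : Nat) : Int) - ((d + 1 : Nat) : Int) = (t : Int) - (d : Int) := by
          push_cast; ring
        rw [e1, ← pvCols_shift]
      · rw [pvCols_shift]

-- ---- output-list shape ----

theorem rev_map_range {α : Type} (n : Nat) (h : Nat → α) :
    ((List.range n).map h).reverse = (List.range n).map (fun d => h (n - 1 - d)) := by
  induction n with
  | zero => simp
  | succ n ih =>
      conv_lhs => rw [List.range_succ]
      rw [List.map_append, List.reverse_append, ih]
      conv_rhs => rw [List.range_succ_eq_map]
      simp only [List.map_cons, List.map_nil, List.reverse_singleton, List.singleton_append,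
        List.map_map, Nat.add_sub_cancel, Nat.sub_zero]
      congr 1
      apply List.map_congr_left
      intro d _
      simp only [Function.comp_apply]
      congr 1
      omega

-- ===== VERDICT (by name: the statement is the Claim_ definition above) =====
theorem getLast_eq_getD {α : Type} (l : List α) (d : α) (h : l ≠ []) :
    l.getLast h = l.getD (l.length - 1) d := by
  rw [List.getLast_eq_getElem, List.getD_eq_getElem _ _ (by cases l with
    | nil => exact absurd rfl h
    | cons a as => simp)]

theorem main_case (g0 : List Int) (rest : List (List Int))
    (hN1 : g0.length ≠ 0)
    (hCG : (PySem.List.pyRange 1 (((g0 :: rest).length : Nat) : Int) 1).foldl (fun cg i =>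
      (PySem.List.pyRange 0 ((g0.length : Nat) : Int) 1).foldl (fun cg2 j =>
        pvAset cg2 i j (pvAget cg2 i j +
          (if j = 0 then max (pvAget cg2 (i-1) j) (pvAget cg2 (i-1) (j+1))
           else if j = ((g0.length : Nat) : Int) - 1 then max (pvAget cg2 (i-1) (j-1)) (pvAget cg2 (i-1) j)
           else max (max (pvAget cg2 (i-1) (j-1)) (pvAget cg2 (i-1) j)) (pvAget cg2 (i-1) (j+1))))) cg)
      (g0 :: rest)
      = g0 :: pvFrows g0.length g0 rest) :
    max_rocket_sum (g0 :: rest) = max_rocket_sum_alt (g0 :: rest) := by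
  have hMne : ¬ ((((g0 :: rest).length : Nat) : Int) = 0) := by
    simp only [List.length_cons]
    push_cast
    omega
  have hNne : ¬ (((g0.length : Nat) : Int) = 0) := by simpa using hN1
  have hrowA : pvArow (g0 :: rest) 0 = g0 := by
    rw [pvArow, PySem.List.pyGetD_zero_cons]
  have hrowB : PySem.List.pyGetD (g0 :: rest) 0 [] = g0 := PySem.List.pyGetD_zero_cons g0 rest []
  have hsl : PySem.List.slice g0 none (some ((g0.length : Nat) : Int)) = g0 := by
    rw [PySem.List.slice_to_natCast]
    exact List.take_length
  simp only [max_rocket_sum, max_rocket_sum_alt, hrowA, hrowB, if_neg hMne, if_neg hNne, hsl, hCG,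
    b_forward (g0 :: rest) g0 rest rfl g0.length rfl]
  -- normalise both last-row reads to getD form
  have hscanrow : ∀ (j : Int), pvAget (g0 :: pvFrows g0.length g0 rest) (-1) j
      = pvBg ((g0 :: pvFrows g0.length g0 rest).getD ((g0 :: pvFrows g0.length g0 rest).length - 1) []) j := by
    intro j
    rw [pvAget_eq, pvArow, PySem.List.pyGetD_neg_one _ _ (List.cons_ne_nil _ _), getLast_eq_getD]
  have hglR : ∀ (h : (g0 :: pvRrows g0.length g0 rest) ≠ []),
      (g0 :: pvRrows g0.length g0 rest).getLast h
      = (g0 :: pvRrows g0.length g0 rest).getD ((g0 :: pvRrows g0.length g0 rest).length - 1) [] :=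
    fun h => getLast_eq_getD _ _ h
  simp only [hscanrow, hglR]
  have hcd : ∀ j, 0 ≤ j → j < ((g0.length : Nat) : Int) →
      pvBg ((g0 :: pvFrows g0.length g0 rest).getD ((g0 :: pvFrows g0.length g0 rest).length - 1) []) j
      = pvBg ((g0 :: pvRrows g0.length g0 rest).getD ((g0 :: pvRrows g0.length g0 rest).length - 1) []) j := by
    intro j h0 hj
    cases rest with
    | nil => rfl
    | cons r rs =>
        have e1 : (g0 :: pvFrows g0.length g0 (r :: rs)).length - 1 = rs.length + 1 := by
          simp [frows_length]
        have e2 : (g0 :: pvRrows g0.length g0 (r :: rs)).length - 1 = rs.length + 1 := by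
          simp [rrows_length]
        rw [e1, e2, List.getD_cons_succ, List.getD_cons_succ]
        exact frows_rrows g0.length g0 (r :: rs) rs.length (by simp) j h0 hj
  rw [scan_congr ((g0.length : Nat) : Int) _ _ hcd]
  cases hfm : (List.foldl (fun (s : Int × Option Int) j =>
      if pvBg ((g0 :: pvRrows g0.length g0 rest).getD ((g0 :: pvRrows g0.length g0 rest).length - 1) []) j > s.1
      then (pvBg ((g0 :: pvRrows g0.length g0 rest).getD ((g0 :: pvRrows g0.length g0 rest).length - 1) []) j, some j)
      else s) (0, none) (PySem.List.pyRange 0 ((g0.length : Nat) : Int) 1)).2 with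
  | none => rfl
  | some lj =>
    have hlj : 0 ≤ lj ∧ lj < ((g0.length : Nat) : Int) :=
      scan_some_range ((g0.length : Nat) : Int)
        (fun j => pvBg ((g0 :: pvRrows g0.length g0 rest).getD ((g0 :: pvRrows g0.length g0 rest).length - 1) []) j) lj hfm
    rw [show ((((g0 :: rest).length : Nat) : Int)) - 2 = ((rest.length : Nat) : Int) - 1 by
      simp only [List.length_cons]; push_cast; ring]
    rw [show ((((g0 :: rest).length : Nat) : Int)) - 1 = ((rest.length : Nat) : Int) by
      simp only [List.length_cons]; push_cast; ring]
    simp only [Int.toNat_natCast, List.length_cons, Nat.add_sub_cancel]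
    -- the windowed argmax equals B's parent choice, row by row
    have hW : ∀ (i l : Int), 0 ≤ i → i < ((rest.length : Nat) : Int) → 0 ≤ l → l < ((g0.length : Nat) : Int) →
        List.foldl (fun mj j =>
          if l - 1 ≤ j ∧ j ≤ l + 1 then
            (if pvAget (g0 :: pvFrows g0.length g0 rest) i j > pvAget (g0 :: pvFrows g0.length g0 rest) i mj then j else mj)
          else mj) l (PySem.List.pyRange 0 ((g0.length : Nat) : Int) 1)
        = pvBpar ((g0.length : Nat) : Int) ((g0 :: pvRrows g0.length g0 rest).getD i.toNat []) l := by
      intro i l h0i hiT h0l hlN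
      have h1 : List.foldl (fun mj j =>
          if l - 1 ≤ j ∧ j ≤ l + 1 then
            (if pvAget (g0 :: pvFrows g0.length g0 rest) i j > pvAget (g0 :: pvFrows g0.length g0 rest) i mj then j else mj)
          else mj) l (PySem.List.pyRange 0 ((g0.length : Nat) : Int) 1)
          = pvBpar ((g0.length : Nat) : Int) (pvArow (g0 :: pvFrows g0.length g0 rest) i) l :=
        window_scan ((g0.length : Nat) : Int) (pvArow (g0 :: pvFrows g0.length g0 rest) i) l h0l hlN
      rw [h1]
      apply pvBpar_congr _ _ _ _ h0l hlN
      intro j hj0 hjN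
      obtain ⟨k, rfl⟩ : ∃ k : Nat, i = (k : Int) := ⟨i.toNat, by omega⟩
      rw [Int.toNat_natCast]
      have hrowk : pvArow (g0 :: pvFrows g0.length g0 rest) (k : Int)
          = (g0 :: pvFrows g0.length g0 rest).getD k [] := by
        rw [pvArow, PySem.List.pyGetD_natCast]
      rw [hrowk]
      cases k with
      | zero => rfl
      | succ k =>
          rw [List.getD_cons_succ, List.getD_cons_succ]
          exact frows_rrows g0.length g0 rest k (by omega) j hj0 hjN
    -- B's stored parent rows agree with the same choice
    have hP : ∀ (i l : Int), 1 ≤ i → i ≤ ((rest.length : Nat) : Int) → 0 ≤ l → l < ((g0.length : Nat) : Int) →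
        pvBg (PySem.List.pyGetD (pvProws g0.length g0 rest) (i - 1) []) l
        = pvBpar ((g0.length : Nat) : Int) ((g0 :: pvRrows g0.length g0 rest).getD (i.toNat - 1) []) l := by
      intro i l h1i hiT h0l hlN
      obtain ⟨k, rfl⟩ : ∃ k : Nat, i = ((k + 1 : Nat) : Int) := ⟨(i - 1).toNat, by omega⟩
      have e : ((k + 1 : Nat) : Int) - 1 = (k : Int) := by push_cast; ring
      rw [e, PySem.List.pyGetD_natCast, Int.toNat_natCast, Nat.add_sub_cancel]
      have hk : k < rest.length := by omega
      rw [prows_getD g0.length g0 rest k hk]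
      obtain ⟨lk, rfl⟩ : ∃ m : Nat, l = (m : Int) := ⟨l.toNat, by omega⟩
      have hlk : lk < g0.length := by omega
      rw [pvBg_eq_getD, List.getD_eq_getElem _ _ (by simpa using hlk)]
      simp
    have hab := a_backtrack ((g0.length : Nat) : Int) (g0 :: pvRrows g0.length g0 rest)
      (fun (i l : Int) => List.foldl (fun mj j =>
        if l - 1 ≤ j ∧ j ≤ l + 1 then
          (if pvAget (g0 :: pvFrows g0.length g0 rest) i j > pvAget (g0 :: pvFrows g0.length g0 rest) i mj then j else mj)
        else mj) l (PySem.List.pyRange 0 ((g0.length : Nat) : Int) 1))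
      (fun (i c : Int) => pvAget (g0 :: rest) i c)
      rest.length (fun i l h0i hiT h0l hlN => hW i l h0i hiT h0l hlN) rest.length le_rfl
      ((List.replicate (rest.length + 1) none).set rest.length (some (pvAget (g0 :: rest) (-1) lj))) lj
      (by simp) hlj.1 hlj.2
    have hbw := b_walk ((g0.length : Nat) : Int) (g0 :: pvRrows g0.length g0 rest)
      (fun (i l : Int) => pvBg (PySem.List.pyGetD (pvProws g0.length g0 rest) (i - 1) []) l)
      (fun (i c : Int) => pvBg (PySem.List.pyGetD (g0 :: rest) i []) c)
      rest.length (fun i l h1i hiT h0l hlN => hP i l h1i hiT h0l hlN) rest.length le_rfl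
      [] lj hlj.1 hlj.2
    congr 1
    congr 1
    trans ((List.range (rest.length + 1)).map (fun (k : Nat) => pvAget (g0 :: rest) (k : Int)
      (pvCols ((g0.length : Nat) : Int) (g0 :: pvRrows g0.length g0 rest) rest.length lj (rest.length - k))))
    · apply List.ext_getElem?
      intro k
      rw [List.getElem?_map, hab.2 k, List.getElem?_map]
      by_cases hk : k < rest.length
      · rw [if_pos hk, List.getElem?_range (by omega)]
        rfl
      · by_cases hk2 : k = rest.length
        · subst hk2
          rw [if_neg hk, List.getElem?_range (by omega)]
          rw [List.getElem?_set_self (by simp)]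
          have hneg : pvAget (g0 :: rest) (-1) lj = pvAget (g0 :: rest) ((rest.length : Nat) : Int) lj := by
            rw [pvAget_eq, pvAget_eq, pvArow, pvArow, PySem.List.pyGetD_neg_one _ _ (List.cons_ne_nil _ _),
              PySem.List.pyGetD_natCast, getLast_eq_getD _ ([] : List Int)]
            simp
          rw [hneg]
          simp [pvCols]
        · rw [if_neg hk, List.getElem?_set_ne (by omega), List.getElem?_replicate,
            if_neg (by omega), List.getElem?_eq_none (by simp; omega)]
          rfl
    · rw [hbw]
      simp only [List.nil_append, List.reverse_append, List.reverse_singleton, List.singleton_append]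
      rw [rev_map_range]
      rw [List.range_succ_eq_map, List.map_cons]
      congr 1
      · simp [pvAget_eq, pvArow, PySem.List.pyGetD_zero_cons, Nat.sub_self]
      · rw [List.map_map]
        apply List.map_congr_left
        intro d hd
        rw [List.mem_range] at hd
        simp only [Function.comp_apply]
        have e1 : ((rest.length : Nat) : Int) - ((rest.length - 1 - d : Nat) : Int) = ((d + 1 : Nat) : Int) := by
          omega
        have e2 : rest.length - 1 - d = rest.length - (d + 1) := by omega
        rw [e1, e2]
        rfl

theorem max_rocket_sum_spec : Claim_equal_max_rocket_sum := by
  intro grid _hdom hpre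
  unfold Spec_max_rocket_sum
  cases grid with
  | nil => rfl
  | cons g0 rest =>
    rcases hpre with hnil | hN0 | ⟨hlen, hM1N2, hpos⟩
    · cases hnil
    · have hN0' : g0.length = 0 := by simpa using hN0
      have hMne : ¬ ((((g0 :: rest).length : Nat) : Int) = 0) := by
        simp only [List.length_cons]
        push_cast
        omega
      simp [max_rocket_sum, max_rocket_sum_alt, pvArow, PySem.List.pyGetD_zero_cons, hN0',
        if_neg hMne]
    · have hM1N2' : (g0 :: rest).length = 1 ∨ 2 ≤ g0.length := by simpa using hM1N2
      have hN1 : g0.length ≠ 0 := by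
        rcases hM1N2' with h1 | h2
        · have hrnil : rest = [] := by
            cases rest
            · rfl
            · simp at h1
          obtain ⟨x, hx, _⟩ := hpos
          rw [hrnil] at hx
          intro hL
          rw [List.eq_nil_of_length_eq_zero hL] at hx
          simp [pvCostAux, List.eq_nil_of_length_eq_zero hL] at hx
        · omega
      apply main_case g0 rest hN1
      by_cases hrest : rest = []
      · subst hrest
        rw [PySem.List.pyRange_one_eq_nil
          (show (((g0 :: ([] : List (List Int))).length : Nat) : Int) ≤ 1 by simp)]
        rfl
      · have hN2 : 2 ≤ g0.length := by
          rcases hM1N2' with h1 | h2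
          · cases rest
            · exact absurd rfl hrest
            · simp at h1
          · exact h2
        have house := outer_loop g0.length hN2 rest [g0] (by simp) (by simp)
          (fun r hr => hlen r (by simp [hr]))
        simp only [List.length_cons, List.length_nil, Nat.zero_add, Nat.cast_one,
          List.singleton_append, List.getLast_singleton] at house
        rw [show (1 : Int) + (rest.length : Int) = (((g0 :: rest).length : Nat) : Int) by
          push_cast [List.length_cons]; ring] at house
        exact house
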